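-- pv_equiv track=rewrite | github.com/FYP-TEAM-INSIGHT/news-verifier | backend/modules/dynamic_ontology/relation_extraction/ner_enhaced_triple_extractor.py | _enhance_pos_with_ner
-- ===== SOURCE A (Python) =====
-- def _enhance_pos_with_ner(pos_tagged_words: list, ner_results: dict) -> list:
--     """
--     Merges POS tags with NER information.
--     If a word is identified as an entity by NER, its POS tag is augmented.
--     e.g., ('ශ්‍රීකාන්ත්', 'NNP') + PERSON -> ('ශ්‍රීකාන්ත්', 'NNP_PERSON')
--     """
--     enhanced_tags = []
--
--     word_to_entity_map = {}
--     for entity_type, entity_list in ner_results.items():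
--         for entity_text in entity_list:
--             for word_part in entity_text.split():
--                 word_to_entity_map[word_part] = entity_type.upper().replace(
--                     "S", ""
--                 )  # Convert 'persons' to 'PERSON' etc.
--
--     for word, pos_tag in pos_tagged_words:
--         new_pos_tag = pos_tag
--         if word in word_to_entity_map:
--             entity_type = word_to_entity_map[word]
--             if not pos_tag.endswith(f"_{entity_type}"):
--                 if pos_tag == "UNK":
--                     new_pos_tag = f"NNP_{entity_type}"
--                 else:
--                     new_pos_tag = f"{pos_tag}_{entity_type}"
--         enhanced_tags.append((word, new_pos_tag))
--     return enhanced_tags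
-- ===== SOURCE B (Python) =====
-- def _enhance_pos_with_ner(pos_tagged_words: list, ner_results: dict) -> list:
--     # Index-free rewrite: instead of building word_to_entity_map, scan
--     # ner_results directly for each word, letting the LAST matching entity
--     # win (which is what dict overwrite gave A).
--     out = []
--     for word, pos_tag in pos_tagged_words:
--         ent = None
--         for entity_type, entity_list in ner_results.items():
--             for entity_text in entity_list:
--                 if word in entity_text.split():
--                     ent = entity_type.upper().replace("S", "")
--         if ent is None or pos_tag.endswith("_" + ent):
--             out.append((word, pos_tag))
--         elif pos_tag == "UNK":
--             out.append((word, "NNP_" + ent))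
--         else:
--             out.append((word, pos_tag + "_" + ent))
--     return out
-- ===== Notes on version B (the rewrite author's own statement) =====
-- stated objective: alternative
-- what changed: B drops A's word_to_entity_map: for each tagged word it scans ner_results directly (last match wins, mirroring dict overwrite) and augments the tag on the spot, so no intermediate dictionary is ever built.
import Mathlib
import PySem

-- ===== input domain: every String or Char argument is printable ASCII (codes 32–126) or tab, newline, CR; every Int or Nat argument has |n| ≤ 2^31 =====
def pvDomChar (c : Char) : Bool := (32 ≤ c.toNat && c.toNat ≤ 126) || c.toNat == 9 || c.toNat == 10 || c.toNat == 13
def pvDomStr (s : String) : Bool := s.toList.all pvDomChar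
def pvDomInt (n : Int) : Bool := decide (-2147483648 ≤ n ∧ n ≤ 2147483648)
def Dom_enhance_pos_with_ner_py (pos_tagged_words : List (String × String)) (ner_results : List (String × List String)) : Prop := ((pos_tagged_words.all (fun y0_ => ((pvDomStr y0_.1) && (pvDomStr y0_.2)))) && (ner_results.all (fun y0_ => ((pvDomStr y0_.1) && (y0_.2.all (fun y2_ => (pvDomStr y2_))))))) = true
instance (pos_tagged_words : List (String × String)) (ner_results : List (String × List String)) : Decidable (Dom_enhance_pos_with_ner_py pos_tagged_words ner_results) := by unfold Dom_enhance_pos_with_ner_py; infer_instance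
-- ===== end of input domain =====

-- B drops A's word_to_entity_map and instead scans ner_results directly per word
-- (last match wins, like dict overwrite); same values, no intermediate dictionary.

-- ===== PORT A =====
-- entity_type.upper().replace("S", "")
def pvEnt (et : String) : String := PySem.Str.replace (PySem.Str.upper et) "S" ""

def enhance_pos_with_ner_py (pos_tagged_words : List (String × String)) (ner_results : List (String × List String)) : List (String × String) :=
  let word_to_entity_map : PySem.Dict String String :=
    ner_results.foldl (fun m p =>
      p.2.foldl (fun m entity_text =>
        (PySem.Str.split₀ entity_text).foldl (fun m word_part =>
          m.insert word_part (pvEnt p.1)) m) m) PySem.Dict.empty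
  pos_tagged_words.foldl (fun enhanced_tags wp =>
    let new_pos_tag :=
      match word_to_entity_map.get? wp.1 with
      | none => wp.2
      | some entity_type =>
          if PySem.Str.endswith wp.2 ("_" ++ entity_type) then wp.2
          else if wp.2 = "UNK" then "NNP_" ++ entity_type
          else wp.2 ++ "_" ++ entity_type
    enhanced_tags ++ [(wp.1, new_pos_tag)]) []

-- ===== PORT B =====
-- last entity matching `word` while scanning ner_results directly
def pvLastEnt (word : String) (ner_results : List (String × List String)) : Option String :=
  ner_results.foldl (fun acc p =>
    p.2.foldl (fun acc2 entity_text =>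
      if word ∈ PySem.Str.split₀ entity_text then some (pvEnt p.1) else acc2) acc) none

def enhance_pos_with_ner_py_alt (pos_tagged_words : List (String × String)) (ner_results : List (String × List String)) : List (String × String) :=
  pos_tagged_words.map (fun wp =>
    match pvLastEnt wp.1 ner_results with
    | none => wp
    | some ent =>
        if PySem.Str.endswith wp.2 ("_" ++ ent) then wp
        else if wp.2 = "UNK" then (wp.1, "NNP_" ++ ent)
        else (wp.1, wp.2 ++ "_" ++ ent))

-- ===== PRECONDITION & SPEC =====
def Spec_enhance_pos_with_ner_py (pos_tagged_words : List (String × String)) (ner_results : List (String × List String)) (out : List (String × String)) : Prop := out = enhance_pos_with_ner_py_alt pos_tagged_words ner_results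
instance (pos_tagged_words : List (String × String)) (ner_results : List (String × List String)) (out : List (String × String)) : Decidable (Spec_enhance_pos_with_ner_py pos_tagged_words ner_results out) := by unfold Spec_enhance_pos_with_ner_py; infer_instance

-- ===== CLAIM (what is proved, stated in full; the proofs are below) =====
def Claim_equal_enhance_pos_with_ner_py : Prop := ∀ (pos_tagged_words : List (String × String)) (ner_results : List (String × List String)), Dom_enhance_pos_with_ner_py pos_tagged_words ner_results → Spec_enhance_pos_with_ner_py pos_tagged_words ner_results (enhance_pos_with_ner_py pos_tagged_words ner_results)

-- ===== LEMMAS AND PROOFS =====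

-- a run of inserts with the same value: last-wins collapses to membership
lemma get_fold_insert (ws : List String) (d : PySem.Dict String String) (w v : String) :
    (ws.foldl (fun m x => m.insert x v) d).get? w
      = if w ∈ ws then some v else d.get? w := by
  induction ws generalizing d with
  | nil => simp
  | cons a t ih =>
      simp only [List.foldl_cons, ih, PySem.Dict.get?_insert, List.mem_cons]
      by_cases h1 : w ∈ t <;> by_cases h2 : w = a <;> simp [h1, h2]

lemma get_fold_txts (txts : List String) (d : PySem.Dict String String) (w v : String) :
    (txts.foldl (fun m t => (PySem.Str.split₀ t).foldl (fun m x => m.insert x v) m) d).get? w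
      = txts.foldl (fun a t => if w ∈ PySem.Str.split₀ t then some v else a) (d.get? w) := by
  induction txts generalizing d with
  | nil => rfl
  | cons a t ih => simp only [List.foldl_cons, ih, get_fold_insert]

lemma get_fold_outer (nr : List (String × List String)) (d : PySem.Dict String String) (w : String) :
    (nr.foldl (fun m p =>
        p.2.foldl (fun m entity_text =>
          (PySem.Str.split₀ entity_text).foldl (fun m word_part =>
            m.insert word_part (pvEnt p.1)) m) m) d).get? w
      = nr.foldl (fun acc p =>
          p.2.foldl (fun acc2 t => if w ∈ PySem.Str.split₀ t then some (pvEnt p.1) else acc2) acc)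
          (d.get? w) := by
  induction nr generalizing d with
  | nil => rfl
  | cons a t ih => simp only [List.foldl_cons, ih, get_fold_txts]

lemma foldl_append_map {α β : Type} (f : α → β) (l : List α) (acc : List β) :
    l.foldl (fun a x => a ++ [f x]) acc = acc ++ l.map f := by
  induction l generalizing acc with
  | nil => simp
  | cons a t ih => simp [ih]

-- ===== VERDICT (by name: the statement is the Claim_ definition above) =====
theorem enhance_pos_with_ner_py_spec : Claim_equal_enhance_pos_with_ner_py := by
  intro ptw nr _
  show _ = _
  unfold enhance_pos_with_ner_py enhance_pos_with_ner_py_alt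
  rw [foldl_append_map]
  simp only [List.nil_append]
  apply List.map_congr_left
  intro wp _
  rw [get_fold_outer]
  have : (PySem.Dict.empty : PySem.Dict String String).get? wp.1 = none := rfl
  rw [this]
  unfold pvLastEnt
  cases nr.foldl (fun acc p =>
      p.2.foldl (fun acc2 t => if wp.1 ∈ PySem.Str.split₀ t then some (pvEnt p.1) else acc2) acc)
      (none : Option String) with
  | none => rfl
  | some e =>
      obtain ⟨w, pos⟩ := wp
      by_cases h1 : PySem.Str.endswith pos ("_" ++ e) = true <;>
        by_cases h2 : pos = "UNK" <;> simp only [h1, h2] <;> split <;> rfl
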